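-- pv_equiv track=rewrite | github.com/sincerity1129/codetest | day17/middle2.py | solution
-- ===== SOURCE A (Python) =====
-- def solution(food):
--     '''
--     매달 주어진 음식 빨리 먹는 푸드 파이트 대회
--     한 선수는 왼쪽에서 오른쪽
--     다른 선수는 오른쪽에서 왼쪽
--     물을 먼저 먹는 선수가 승리
--
--     food = [물, 칼로리 순서로 개수]
--
--     풀이과정
--     무조건 짝수로 개수 카운팅
--     개수의 몫을 구해서 양 옆에 개수 카운팅
--     '''
--     food_list = ['0']
--     for idx, food_count in enumerate(reversed(food)):
--         calorie = len(food) - idx - 1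
--         if calorie == 0:
--             continue
--         distribution = int(food_count) // 2
--         food_list = [str(calorie)*distribution] + food_list
--         food_list.append(str(calorie)*distribution)
--
--     answer = ''.join(food_list)
--     return answer
-- ===== SOURCE B (Python) =====
-- def solution(food):
--     parts = [str(i) * (n // 2) for i, n in enumerate(food) if i > 0]
--     return ''.join(parts + ['0'] + parts[::-1])
-- ===== Notes on version B (the rewrite author's own statement) =====
-- stated objective: simpler
-- what changed: B builds only the left half as a single forward comprehension over enumerate(food) and mirrors it with one list reversal, instead of A's loop over reversed(food) that grows the list two-sidedly by prepending and appending around the central '0'.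
import Mathlib
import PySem

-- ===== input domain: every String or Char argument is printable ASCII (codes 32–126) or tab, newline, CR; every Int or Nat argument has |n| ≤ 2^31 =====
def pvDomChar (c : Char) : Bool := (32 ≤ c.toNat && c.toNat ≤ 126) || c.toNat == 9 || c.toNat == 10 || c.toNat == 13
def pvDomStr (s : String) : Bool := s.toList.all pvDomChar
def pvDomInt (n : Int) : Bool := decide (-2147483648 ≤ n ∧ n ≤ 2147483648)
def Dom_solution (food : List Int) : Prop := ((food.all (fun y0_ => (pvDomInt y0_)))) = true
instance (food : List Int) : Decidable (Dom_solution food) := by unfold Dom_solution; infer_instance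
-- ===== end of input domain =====

-- B builds only the left half forward and mirrors it (simpler decomposition); same return value as A.

-- ===== PORT A =====
-- str(calorie) * distribution  (int(food_count) is the identity on an int argument)
def pvChunk (calorie : Int) (distribution : Int) : String :=
  String.ofList (PySem.List.pyRepeat (PySem.Int.toStr calorie).toList distribution)

def solution (food : List Int) : String :=
  let food_list : List String :=
    (PySem.List.enumerate food.reverse).foldl
      (fun food_list p =>
        let calorie : Int := (food.length : Int) - p.1 - 1
        if calorie = 0 then food_list
        else
          let distribution : Int := PySem.Int.floordiv p.2 2
          [pvChunk calorie distribution] ++ food_list ++ [pvChunk calorie distribution])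
      ["0"]
  PySem.Str.join "" food_list

-- ===== PORT B =====
def solution_alt (food : List Int) : String :=
  let parts : List String :=
    ((PySem.List.enumerate food).filter (fun q => decide (0 < q.1))).map
      (fun q => pvChunk q.1 (PySem.Int.floordiv q.2 2))
  PySem.Str.join "" (parts ++ ["0"] ++ parts.reverse)

-- ===== PRECONDITION & SPEC =====
def Spec_solution (food : List Int) (out : String) : Prop := out = solution_alt food
instance (food : List Int) (out : String) : Decidable (Spec_solution food out) := by unfold Spec_solution; infer_instance

-- ===== CLAIM (what is proved, stated in full; the proofs are below) =====
def Claim_equal_solution : Prop := ∀ (food : List Int), Dom_solution food → Spec_solution food (solution food)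

-- ===== LEMMAS AND PROOFS =====

-- A's loop shape: each kept element is both prepended and appended around the accumulator.
theorem pvFoldlTwoSided {β : Type} (g : β → String) (c : β → Int) :
    ∀ (L : List β) (M : List String),
      L.foldl (fun fl p => if c p = 0 then fl else [g p] ++ fl ++ [g p]) M
        = ((L.filter (fun p => decide (c p ≠ 0))).map g).reverse ++ M
            ++ (L.filter (fun p => decide (c p ≠ 0))).map g := by
  intro L
  induction L with
  | nil => intro M; simp
  | cons p L ih =>
    intro M
    rw [List.foldl_cons, ih]
    by_cases h : c p = 0 <;> simp [h]

theorem pvEnumShift {α : Type} (xs : List α) :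
    ∀ (s : Int), PySem.List.enumerate xs (s + 1)
      = (PySem.List.enumerate xs s).map (fun p => (p.1 + 1, p.2)) := by
  induction xs with
  | nil => intro s; simp [PySem.List.enumerate_nil]
  | cons x xs ih => intro s; simp [PySem.List.enumerate_cons, ih (s + 1)]

-- reversing the input shifts each enumerate index i to n - i - 1
theorem pvEnumRev (xs : List Int) :
    (PySem.List.enumerate xs.reverse).map
        (fun p => (((xs.length : Int) - p.1 - 1, p.2) : Int × Int))
      = (PySem.List.enumerate xs).reverse := by
  induction xs using List.reverseRecOn with
  | nil => simp [PySem.List.enumerate_nil]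
  | append_singleton xs a ih =>
    have happ : ∀ (u v : List Int) (s : Int),
        PySem.List.enumerate (u ++ v) s
          = PySem.List.enumerate u s ++ PySem.List.enumerate v (s + u.length) := by
      intro u
      induction u with
      | nil => intro v s; simp [PySem.List.enumerate_nil]
      | cons x u ihu =>
        intro v s
        simp [PySem.List.enumerate_cons, ihu v (s + 1)]
        ring_nf
    rw [List.reverse_append, List.reverse_singleton]
    simp only [List.singleton_append, PySem.List.enumerate_cons, happ xs [a] 0,
      PySem.List.enumerate_cons, PySem.List.enumerate_nil, List.reverse_append]
    rw [show (0 : Int) + 1 = 0 + 1 by rfl, pvEnumShift]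
    simp only [List.map_cons, List.map_map, List.reverse_singleton, List.singleton_append]
    congr 1
    · simp
    · rw [← ih]
      apply List.map_congr_left
      intro p _
      simp

theorem pvEnumFstNonneg (xs : List Int) :
    ∀ (s : Int) (q : Int × Int), q ∈ PySem.List.enumerate xs s → s ≤ q.1 := by
  induction xs with
  | nil => intro s q h; simp [PySem.List.enumerate_nil] at h
  | cons x xs ih =>
    intro s q h
    rw [PySem.List.enumerate_cons] at h
    rcases List.mem_cons.mp h with h | h
    · simp [h]
    · have := ih (s + 1) q h; omega

theorem pvKey (food : List Int) :
    ((PySem.List.enumerate food.reverse).filter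
        (fun p => decide ¬((food.length : Int) - p.1 - 1 = 0))).map
      (fun p => pvChunk ((food.length : Int) - p.1 - 1) (PySem.Int.floordiv p.2 2))
    = (((PySem.List.enumerate food).filter (fun q => decide (0 < q.1))).map
        (fun q => pvChunk q.1 (PySem.Int.floordiv q.2 2))).reverse := by
  have hcong : (PySem.List.enumerate food).filter (fun q => decide (0 < q.1))
      = (PySem.List.enumerate food).filter (fun q => decide ¬(q.1 = 0)) := by
    apply List.filter_congr
    intro q hq
    have h0 := pvEnumFstNonneg food 0 q hq
    simp only [decide_eq_decide]
    omega
  rw [hcong, ← List.map_reverse, ← List.filter_reverse, ← pvEnumRev food,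
    List.filter_map, List.map_map]
  simp only [Function.comp_def]

-- ===== VERDICT (by name: the statement is the Claim_ definition above) =====
theorem solution_spec : Claim_equal_solution := by
  intro food _
  unfold Spec_solution solution solution_alt
  dsimp only
  rw [pvFoldlTwoSided
    (fun p : Int × Int => pvChunk ((food.length : Int) - p.1 - 1) (PySem.Int.floordiv p.2 2))
    (fun p : Int × Int => (food.length : Int) - p.1 - 1), pvKey food]
  simp
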